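-- pv_equiv track=rewrite | github.com/aadhityasw/Competitive-Programs | questions/q384_kill_captain_america/excess_memory.py | formReversedGraph
-- ===== SOURCE A (Python) =====
-- def formReversedGraph(edges) :
--     """
--     Given a list of edges, converts it into a adjacency list representation of a graph.
--
--     Parameters
--     ----------
--     * edges - list of all edges
--
--     Return
--     ------
--     * graph - a adjacency list representation of the reversed graph
--     """
--
--     # Initialize a dictionary for the graph
--     graph = {}
--
--     # Add the edges to the graph
--     for v, u in edges :
--         if u in graph :
--             graph[u].add(v)
--         else :
--             graph[u] = {v}
--         if v not in graph :
--             graph[v] = set()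
--
--     # Return the graph
--     return graph
-- ===== SOURCE B (Python) =====
-- def formReversedGraph(edges):
--     """Declarative rebuild: dedup the endpoints, then compute each vertex's
--     reversed adjacency set by a per-vertex comprehension over the edges."""
--     keys = dict.fromkeys(x for v, u in edges for x in (u, v))
--     return {k: {v for v, u in edges if u == k} for k in keys}
-- ===== Notes on version B (the rewrite author's own statement) =====
-- stated objective: alternative
-- what changed: A incrementally mutates a dict in one pass with per-edge membership branches; B is declarative: dedup all endpoints into the key list, then build the whole dict by a per-vertex set comprehension that scans the edges for each key (O(V*E) nested scans instead of A's incremental O(E) dict updates).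
import Mathlib
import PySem

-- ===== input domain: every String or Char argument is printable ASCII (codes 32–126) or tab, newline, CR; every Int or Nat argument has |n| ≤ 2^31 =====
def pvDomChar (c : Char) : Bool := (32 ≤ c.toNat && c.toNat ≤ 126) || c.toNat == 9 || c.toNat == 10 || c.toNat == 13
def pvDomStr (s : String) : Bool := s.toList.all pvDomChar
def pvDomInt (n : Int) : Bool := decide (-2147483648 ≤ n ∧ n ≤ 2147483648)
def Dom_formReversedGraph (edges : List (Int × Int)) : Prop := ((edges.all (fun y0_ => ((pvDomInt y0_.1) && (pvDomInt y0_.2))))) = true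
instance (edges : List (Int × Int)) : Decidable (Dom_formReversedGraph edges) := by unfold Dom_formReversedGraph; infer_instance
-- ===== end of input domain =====

-- B replaces A's incremental one-pass dict mutation by a declarative rebuild: dedup the
-- endpoints, then a per-vertex set comprehension over the edges; alternative, not faster.

-- ===== PORT A =====
def formReversedGraph (edges : List (Int × Int)) : List (Int × List Int) :=
  (edges.foldl
    (fun graph p =>
      let v := p.1
      let u := p.2
      let graph :=
        if graph.contains u then
          graph.modify u PySem.Set.empty (fun s => PySem.Set.add s v)   -- graph[u].add(v)
        else
          graph.insert u (PySem.Set.ofList [v])                          -- graph[u] = {v}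
      if graph.contains v then graph else graph.insert v PySem.Set.empty)
    (PySem.Dict.empty : PySem.Dict Int (PySem.Set Int))).items

-- ===== PORT B =====
def formReversedGraph_alt (edges : List (Int × Int)) : List (Int × List Int) :=
  -- keys = dict.fromkeys(x for v, u in edges for x in (u, v))
  let keys : List Int := PySem.List.dedup (edges.flatMap (fun p => [p.2, p.1]))
  -- {k: {v for v, u in edges if u == k} for k in keys}
  keys.map (fun k => (k, PySem.Set.ofList ((edges.filter (fun p => p.2 == k)).map (·.1))))

-- ===== PRECONDITION & SPEC =====
def Spec_formReversedGraph (edges : List (Int × Int)) (out : List (Int × List Int)) : Prop := out = formReversedGraph_alt edges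
instance (edges : List (Int × Int)) (out : List (Int × List Int)) : Decidable (Spec_formReversedGraph edges out) := by unfold Spec_formReversedGraph; infer_instance

-- ===== CLAIM (what is proved, stated in full; the proofs are below) =====
def Claim_equal_formReversedGraph : Prop := ∀ (edges : List (Int × Int)), Dom_formReversedGraph edges → Spec_formReversedGraph edges (formReversedGraph edges)

-- ===== LEMMAS AND PROOFS =====

-- Named copies of A's loop body and its two stages (definitionally equal to the lambdas in the port).
def fgStepA (g : PySem.Dict Int (PySem.Set Int)) (p : Int × Int) : PySem.Dict Int (PySem.Set Int) :=
  let v := p.1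
  let u := p.2
  let g :=
    if g.contains u then g.modify u PySem.Set.empty (fun s => PySem.Set.add s v)
    else g.insert u (PySem.Set.ofList [v])
  if g.contains v then g else g.insert v PySem.Set.empty

def fgStepB (d : PySem.Dict Int (PySem.Set Int)) (p : Int × Int) : PySem.Dict Int (PySem.Set Int) :=
  d.modify p.2 PySem.Set.empty (fun s => PySem.Set.add s p.1)

def fgEnsure (d : PySem.Dict Int (PySem.Set Int)) (k : Int) : PySem.Dict Int (PySem.Set Int) :=
  if d.contains k then d else d.insert k PySem.Set.empty

def fgAddKeys (d : PySem.Dict Int (PySem.Set Int)) (es : List (Int × Int)) : PySem.Dict Int (PySem.Set Int) :=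
  es.foldl (fun d p => fgEnsure (fgEnsure d p.2) p.1) d

-- fgFill es s k adds, in edge order, the source of every edge targeting k into s.
def fgFill (es : List (Int × Int)) (s : PySem.Set Int) (k : Int) : PySem.Set Int :=
  es.foldl (fun s' p => if p.2 == k then PySem.Set.add s' p.1 else s') s

-- inserting a fresh key commutes with overwriting an existing one
lemma fg_insert_comm (d : PySem.Dict Int (PySem.Set Int)) (u k : Int) (w x : PySem.Set Int)
    (hu : d.contains u = true) (hk : d.contains k = false) :
    (d.insert u w).insert k x = (d.insert k x).insert u w := by
  have hne : k ≠ u := fun h => by rw [h, hu] at hk; cases hk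
  have hku : (k == u) = false := by simp [hne]
  apply PySem.Dict.ext
  have h1 : (d.insert u w).contains k = false := by
    rw [PySem.Dict.contains_insert, hku, hk]; rfl
  have h2 : (d.insert k x).contains u = true := by
    rw [PySem.Dict.contains_insert, hu, Bool.or_true]
  rw [PySem.Dict.items_insert_of_not_contains _ _ h1,
      PySem.Dict.items_insert_of_contains _ _ hu,
      PySem.Dict.items_insert_of_contains _ _ h2,
      PySem.Dict.items_insert_of_not_contains _ _ hk,
      List.map_append]
  simp [hne]

-- step A = ensure both endpoints, then step B
lemma fg_stepA_eq (d : PySem.Dict Int (PySem.Set Int)) (p : Int × Int) :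
    fgStepA d p = fgStepB (fgEnsure (fgEnsure d p.2) p.1) p := by
  obtain ⟨v, u⟩ := p
  simp only [fgStepA, fgStepB, fgEnsure, PySem.Dict.modify]
  by_cases hu : d.contains u = true
  · rw [if_pos hu, if_pos hu]
    by_cases hv : d.contains v = true
    · have hgv : (d.insert u ((d.getD u PySem.Set.empty).add v)).contains v = true := by
        rw [PySem.Dict.contains_insert, hv, Bool.or_true]
      rw [if_pos hv, if_pos hgv]
    · have hv' : d.contains v = false := by simpa using hv
      have hvu : v ≠ u := fun h => hv (h ▸ hu)
      have hgv : ¬ (d.insert u ((d.getD u PySem.Set.empty).add v)).contains v = true := by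
        rw [PySem.Dict.contains_insert, hv']
        simp [hvu]
      rw [if_neg hv, if_neg hgv,
          PySem.Dict.getD_insert_of_ne _ _ _ (Ne.symm hvu)]
      exact fg_insert_comm d u v _ _ hu hv'
  · have hu' : d.contains u = false := by simpa using hu
    have hofl : PySem.Set.ofList [v] = PySem.Set.add PySem.Set.empty v := rfl
    rw [if_neg hu, if_neg hu, hofl]
    by_cases hv : ((v == u) || d.contains v) = true
    · have hA : (d.insert u (PySem.Set.add PySem.Set.empty v)).contains v = true := by
        rw [PySem.Dict.contains_insert]; exact hv
      have hB : (d.insert u PySem.Set.empty).contains v = true := by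
        rw [PySem.Dict.contains_insert]; exact hv
      rw [if_pos hA, if_pos hB, PySem.Dict.getD_insert_self, PySem.Dict.insert_insert_self]
    · have hv' : ((v == u) || d.contains v) = false := by simpa using hv
      have hA : ¬ (d.insert u (PySem.Set.add PySem.Set.empty v)).contains v = true := by
        rw [PySem.Dict.contains_insert, hv']; exact Bool.false_ne_true
      have hB : ¬ (d.insert u PySem.Set.empty).contains v = true := by
        rw [PySem.Dict.contains_insert, hv']; exact Bool.false_ne_true
      have hvu : v ≠ u := by
        intro h; rw [h] at hv'; simp at hv'
      rw [if_neg hA, if_neg hB,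
          PySem.Dict.getD_insert_of_ne _ _ _ (Ne.symm hvu), PySem.Dict.getD_insert_self,
          ← fg_insert_comm (d.insert u PySem.Set.empty) u v _ _
            (PySem.Dict.contains_insert_self d u PySem.Set.empty) (by simpa using hB),
          PySem.Dict.insert_insert_self]

lemma fg_contains_ensure_self (d : PySem.Dict Int (PySem.Set Int)) (k : Int) :
    (fgEnsure d k).contains k = true := by
  unfold fgEnsure
  split_ifs with h
  · exact h
  · exact PySem.Dict.contains_insert_self d k PySem.Set.empty

lemma fg_contains_ensure_mono (d : PySem.Dict Int (PySem.Set Int)) (k j : Int)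
    (h : d.contains j = true) : (fgEnsure d k).contains j = true := by
  unfold fgEnsure
  split_ifs with h0
  · exact h
  · rw [PySem.Dict.contains_insert, h, Bool.or_true]

-- ensure commutes with step B when step B's key is already present
lemma fg_ensure_stepB_comm (d : PySem.Dict Int (PySem.Set Int)) (p : Int × Int) (k : Int)
    (h : d.contains p.2 = true) :
    fgEnsure (fgStepB d p) k = fgStepB (fgEnsure d k) p := by
  simp only [fgEnsure, fgStepB]
  by_cases hk : d.contains k = true
  · have h1 : (d.modify p.2 PySem.Set.empty (fun s => PySem.Set.add s p.1)).contains k = true := by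
      rw [PySem.Dict.contains_modify, hk, Bool.or_true]
    rw [if_pos h1, if_pos hk]
  · have hk' : d.contains k = false := by simpa using hk
    have hku : k ≠ p.2 := fun he => hk (he ▸ h)
    have h1 : ¬ (d.modify p.2 PySem.Set.empty (fun s => PySem.Set.add s p.1)).contains k = true := by
      rw [PySem.Dict.contains_modify, hk']
      simp [hku]
    rw [if_neg h1, if_neg hk]
    simp only [PySem.Dict.modify]
    rw [PySem.Dict.getD_insert_of_ne _ _ _ (Ne.symm hku)]
    exact fg_insert_comm d p.2 k _ _ h hk'

lemma fg_addKeys_stepB_comm (es : List (Int × Int)) (d : PySem.Dict Int (PySem.Set Int)) (p : Int × Int)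
    (h : d.contains p.2 = true) :
    fgAddKeys (fgStepB d p) es = fgStepB (fgAddKeys d es) p := by
  induction es generalizing d with
  | nil => rfl
  | cons q es ih =>
    show fgAddKeys (fgEnsure (fgEnsure (fgStepB d p) q.2) q.1) es
        = fgStepB (fgAddKeys (fgEnsure (fgEnsure d q.2) q.1) es) p
    rw [fg_ensure_stepB_comm d p q.2 h,
        fg_ensure_stepB_comm _ p q.1 (fg_contains_ensure_mono d q.2 p.2 h)]
    exact ih _ (fg_contains_ensure_mono _ q.1 p.2 (fg_contains_ensure_mono d q.2 p.2 h))

-- the main commutation: A's single pass = key pass then fill pass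
lemma fg_main (es : List (Int × Int)) (d : PySem.Dict Int (PySem.Set Int)) :
    es.foldl fgStepA d = es.foldl fgStepB (fgAddKeys d es) := by
  induction es generalizing d with
  | nil => rfl
  | cons p es ih =>
    show es.foldl fgStepA (fgStepA d p)
        = es.foldl fgStepB (fgStepB (fgAddKeys (fgEnsure (fgEnsure d p.2) p.1) es) p)
    rw [fg_stepA_eq d p, ih,
        fg_addKeys_stepB_comm es _ p
          (fg_contains_ensure_mono _ p.1 p.2 (fg_contains_ensure_self d p.2))]

-- the key pass over the collected vertex set is fgAddKeys from empty
lemma fg_keyfold_add (s : PySem.Set Int) (x : Int) :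
    (PySem.Set.add s x).foldl (fun d k => d.insert k PySem.Set.empty) PySem.Dict.empty
      = fgEnsure (s.foldl (fun d k => d.insert k PySem.Set.empty) PySem.Dict.empty) x := by
  by_cases hx : x ∈ s
  · rw [PySem.Set.add_of_mem hx]
    have hc : (s.foldl (fun (d : PySem.Dict Int (PySem.Set Int)) k => d.insert k PySem.Set.empty) PySem.Dict.empty).contains x = true := by
      rw [PySem.Dict.contains_iff_mem_keys,
          PySem.Dict.keys_foldl_insert s (fun _ _ => PySem.Set.empty) PySem.Dict.empty,
          PySem.Dict.keys_empty, PySem.Set.update_nil_left, PySem.Set.mem_ofList]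
      exact hx
    rw [fgEnsure, if_pos hc]
  · rw [PySem.Set.add_of_not_mem hx, List.foldl_append]
    have hc : ¬ (s.foldl (fun (d : PySem.Dict Int (PySem.Set Int)) k => d.insert k PySem.Set.empty) PySem.Dict.empty).contains x = true := by
      rw [PySem.Dict.contains_iff_mem_keys,
          PySem.Dict.keys_foldl_insert s (fun _ _ => PySem.Set.empty) PySem.Dict.empty,
          PySem.Dict.keys_empty, PySem.Set.update_nil_left, PySem.Set.mem_ofList]
      exact hx
    rw [fgEnsure, if_neg hc]
    rfl

lemma fg_keyfold (es : List (Int × Int)) (s : PySem.Set Int) :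
    (es.foldl (fun s p => PySem.Set.add (PySem.Set.add s p.2) p.1) s).foldl
        (fun d k => d.insert k PySem.Set.empty) PySem.Dict.empty
      = fgAddKeys (s.foldl (fun d k => d.insert k PySem.Set.empty) PySem.Dict.empty) es := by
  induction es generalizing s with
  | nil => rfl
  | cons p es ih =>
    show (es.foldl (fun s p => PySem.Set.add (PySem.Set.add s p.2) p.1)
            (PySem.Set.add (PySem.Set.add s p.2) p.1)).foldl
          (fun d k => d.insert k PySem.Set.empty) PySem.Dict.empty
        = fgAddKeys (fgEnsure (fgEnsure (s.foldl (fun d k => d.insert k PySem.Set.empty) PySem.Dict.empty) p.2) p.1) es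
    rw [ih, fg_keyfold_add, fg_keyfold_add]

-- B's flatMap endpoint list folds the same vertex set A's two adds build
lemma fg_set_flat (es : List (Int × Int)) (s : PySem.Set Int) :
    (es.flatMap (fun p => [p.2, p.1])).foldl PySem.Set.add s
      = es.foldl (fun s p => PySem.Set.add (PySem.Set.add s p.2) p.1) s := by
  induction es generalizing s with
  | nil => rfl
  | cons p es ih => simpa [List.foldl] using ih (PySem.Set.add (PySem.Set.add s p.2) p.1)

-- one fill step, on items
lemma fg_stepB_items (d : PySem.Dict Int (PySem.Set Int)) (p : Int × Int)
    (hd : d.contains p.2 = true) (hn : d.keys.Nodup) :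
    (fgStepB d p).items
      = d.items.map (fun kv => (kv.1, if p.2 == kv.1 then PySem.Set.add kv.2 p.1 else kv.2)) := by
  simp only [fgStepB, PySem.Dict.modify]
  rw [PySem.Dict.items_insert_of_contains _ _ hd]
  apply List.map_congr_left
  rintro ⟨a, s⟩ hq
  by_cases h : a = p.2
  · subst h
    have hg : d.getD p.2 ([] : PySem.Set Int) = s :=
      PySem.Dict.getD_of_mem_items d hq hn []
    simp [hg]
  · simp [h, Ne.symm h]

-- the fill pass, on items
lemma fg_fill_items (es : List (Int × Int)) (d : PySem.Dict Int (PySem.Set Int))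
    (hd : ∀ p ∈ es, d.contains p.2 = true) (hn : d.keys.Nodup) :
    (es.foldl fgStepB d).items = d.items.map (fun kv => (kv.1, fgFill es kv.2 kv.1)) := by
  induction es generalizing d with
  | nil => simp [fgFill]
  | cons p es ih =>
    have hdp : d.contains p.2 = true := hd p (List.mem_cons_self ..)
    have hd' : ∀ q ∈ es, (fgStepB d p).contains q.2 = true := by
      intro q hq
      rw [fgStepB, PySem.Dict.contains_modify, hd q (List.mem_cons_of_mem _ hq), Bool.or_true]
    have hn' : (fgStepB d p).keys.Nodup := by
      rw [fgStepB, PySem.Dict.keys_modify, PySem.Dict.keys_insert_of_contains _ _ hdp]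
      exact hn
    show (es.foldl fgStepB (fgStepB d p)).items = _
    rw [ih _ hd' hn', fg_stepB_items d p hdp hn, List.map_map]
    apply List.map_congr_left
    intro q _
    show (q.1, fgFill es (if p.2 == q.1 then PySem.Set.add q.2 p.1 else q.2) q.1)
        = (q.1, fgFill (p :: es) q.2 q.1)
    rfl

-- the conditional fill equals folding add over the filtered sources
lemma fg_fill_eq (es : List (Int × Int)) (k : Int) (s : PySem.Set Int) :
    fgFill es s k = ((es.filter (fun p => p.2 == k)).map (·.1)).foldl PySem.Set.add s := by
  induction es generalizing s with
  | nil => rfl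
  | cons p es ih =>
    by_cases h : p.2 == k
    · simp [fgFill, h, List.foldl] at ih ⊢; exact ih _
    · simp only [Bool.not_eq_true] at h
      simp [fgFill, h, List.foldl] at ih ⊢; exact ih _

-- ===== VERDICT (by name: the statement is the Claim_ definition above) =====
theorem formReversedGraph_spec : Claim_equal_formReversedGraph := by
  intro edges _
  show formReversedGraph edges = formReversedGraph_alt edges
  obtain ⟨K, hK⟩ : ∃ K, K = PySem.List.dedup (edges.flatMap (fun p => [p.2, p.1])) := ⟨_, rfl⟩
  have hKnodup : K.Nodup := by
    rw [hK, PySem.List.dedup_eq_ofList]; exact PySem.Set.nodup_ofList _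
  have hKfold : K = edges.foldl (fun s p => PySem.Set.add (PySem.Set.add s p.2) p.1)
      PySem.Set.empty := by
    rw [hK, PySem.List.dedup_eq_ofList, PySem.Set.ofList_eq_foldl, fg_set_flat]
    rfl
  have hd0 : (K.foldl (fun (d : PySem.Dict Int (PySem.Set Int)) k => d.insert k PySem.Set.empty)
      PySem.Dict.empty).items = K.map (fun k => (k, PySem.Set.empty)) := by
    simpa using PySem.Dict.items_foldl_insert_fresh (l := K) (k := fun x => x)
      (v := fun _ => PySem.Set.empty) (d := PySem.Dict.empty)
      (by intro a _; simp) (by simpa using hKnodup)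
  have hkeys : (K.foldl (fun (d : PySem.Dict Int (PySem.Set Int)) k => d.insert k PySem.Set.empty)
      PySem.Dict.empty).keys = K := by
    simp only [PySem.Dict.keys, hd0]
    simp [Function.comp_def]
  have hcont : ∀ p ∈ edges,
      (K.foldl (fun (d : PySem.Dict Int (PySem.Set Int)) k => d.insert k PySem.Set.empty)
        PySem.Dict.empty).contains p.2 = true := by
    intro p hp
    rw [PySem.Dict.contains_iff_mem_keys, hkeys, hK, PySem.List.dedup_eq_ofList,
        PySem.Set.mem_ofList]
    exact List.mem_flatMap.2 ⟨p, hp, by simp⟩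
  have hA : formReversedGraph edges
      = (edges.foldl fgStepB
          (K.foldl (fun (d : PySem.Dict Int (PySem.Set Int)) k => d.insert k PySem.Set.empty)
            PySem.Dict.empty)).items := by
    show (edges.foldl fgStepA PySem.Dict.empty).items = _
    rw [fg_main]
    congr 1
    rw [hKfold, fg_keyfold edges PySem.Set.empty]
    rfl
  rw [hA, fg_fill_items edges _ hcont (by rw [hkeys]; exact hKnodup), hd0, List.map_map]
  show _ = (PySem.List.dedup (edges.flatMap (fun p => [p.2, p.1]))).map
      (fun k => (k, PySem.Set.ofList ((edges.filter (fun p => p.2 == k)).map (·.1))))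
  rw [← hK]
  apply List.map_congr_left
  intro k _
  show (k, fgFill edges PySem.Set.empty k) = _
  rw [fg_fill_eq, PySem.Set.ofList_eq_foldl]
  rfl
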